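-- pv_equiv track=rewrite | github.com/travipross/aoc2019 | aoc2019/day4/day4.py | has_repeating_digits
-- ===== SOURCE A (Python) =====
-- def has_repeating_digits(digits, max_2=False):
--     repeated = 1
--     prev_digit = None
--     for d in digits:
--         # increment sequential match count if same as previous
--         if d == prev_digit:
--             repeated += 1
--         # return true if sequence quota was met
--         elif repeated == 2:
--             return True
--         else:
--             repeated = 1
--         prev_digit = d
--
--         # if not limiting sequence quota, quit as soon as sequence was found
--         if not max_2 and repeated >= 2:
--             return True
--
--     # if final sequence was 2
--     return repeated == 2
-- ===== SOURCE B (Python) =====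
-- def has_repeating_digits(digits, max_2=False):
--     # Phase 1: build the list of consecutive-run lengths.
--     lengths = []
--     prev = None
--     for d in digits:
--         if lengths and d == prev:
--             lengths[-1] += 1
--         else:
--             lengths.append(1)
--         prev = d
--     # Phase 2: check the run lengths.
--     if max_2:
--         return 2 in lengths
--     return any(l >= 2 for l in lengths)
-- ===== Notes on version B (the rewrite author's own statement) =====
-- stated objective: simpler
-- what changed: Replaced A's single-pass counter with early exits and three-way branching by a two-phase computation: first build the list of consecutive-run lengths, then return '2 in lengths' for max_2 and 'any length >= 2' otherwise.
import Mathlib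
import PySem

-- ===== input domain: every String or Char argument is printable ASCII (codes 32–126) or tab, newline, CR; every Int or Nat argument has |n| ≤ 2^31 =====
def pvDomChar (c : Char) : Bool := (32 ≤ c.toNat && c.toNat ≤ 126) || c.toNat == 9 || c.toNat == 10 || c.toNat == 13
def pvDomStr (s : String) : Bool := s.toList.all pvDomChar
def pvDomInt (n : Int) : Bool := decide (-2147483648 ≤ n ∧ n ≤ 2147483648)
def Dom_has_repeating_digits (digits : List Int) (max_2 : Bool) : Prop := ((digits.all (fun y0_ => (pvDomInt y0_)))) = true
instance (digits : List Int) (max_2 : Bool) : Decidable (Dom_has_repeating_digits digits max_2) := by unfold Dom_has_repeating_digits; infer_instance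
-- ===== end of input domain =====

-- B is a two-phase run-length reformulation (build consecutive-run lengths, then check them)
-- of A's single-pass counter with early exits; objective: simpler, same return value everywhere.

-- ===== PORT A =====
-- A's loop: state (repeated, prev_digit); early `return True`s become returning `true`.
def hrdGoA (max_2 : Bool) : List Int → Int → Option Int → Bool
  | [], repeated, _ => repeated == 2
  | d :: ds, repeated, prev =>
    if some d = prev then
      let repeated := repeated + 1
      if !max_2 && repeated ≥ 2 then true else hrdGoA max_2 ds repeated (some d)
    else if repeated == 2 then true
    else
      if !max_2 && (1 : Int) ≥ 2 then true else hrdGoA max_2 ds 1 (some d)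

def has_repeating_digits (digits : List Int) (max_2 : Bool) : Bool :=
  hrdGoA max_2 digits 1 none

-- ===== PORT B =====
-- Phase 1 of Source B: build the list of consecutive-run lengths (current run's digit and count carried).
def hrdRuns : List Int → Int → Int → List Int
  | [], _, c => [c]
  | d :: ds, p, c => if d = p then hrdRuns ds p (c + 1) else c :: hrdRuns ds d 1

def hrdLengths : List Int → List Int
  | [] => []
  | d :: ds => hrdRuns ds d 1

def has_repeating_digits_alt (digits : List Int) (max_2 : Bool) : Bool :=
  let lengths := hrdLengths digits
  if max_2 then lengths.contains 2 else lengths.any (fun l => 2 ≤ l)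

-- ===== PRECONDITION & SPEC =====
def Spec_has_repeating_digits (digits : List Int) (max_2 : Bool) (out : Bool) : Prop := out = has_repeating_digits_alt digits max_2
instance (digits : List Int) (max_2 : Bool) (out : Bool) : Decidable (Spec_has_repeating_digits digits max_2 out) := by unfold Spec_has_repeating_digits; infer_instance

-- ===== CLAIM (what is proved, stated in full; the proofs are below) =====
def Claim_equal_has_repeating_digits : Prop := ∀ (digits : List Int) (max_2 : Bool), Dom_has_repeating_digits digits max_2 → Spec_has_repeating_digits digits max_2 (has_repeating_digits digits max_2)

-- ===== LEMMAS AND PROOFS =====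

-- If the pending run already has length ≥ 2, the run-length list contains a length ≥ 2.
theorem hrdRuns_any_ge_two (ds : List Int) (p c : Int) (hc : 2 ≤ c) :
    (hrdRuns ds p c).any (fun l => 2 ≤ l) = true := by
  induction ds generalizing p c with
  | nil => simp [hrdRuns]; omega
  | cons d ds ih =>
    simp only [hrdRuns]
    split
    · exact ih p (c + 1) (by omega)
    · simp [List.any_cons]; left; omega

-- max_2 = false: A's loop with counter 1 equals "some run length ≥ 2".
theorem hrdGoA_false (ds : List Int) (p : Int) :
    hrdGoA false ds 1 (some p) = (hrdRuns ds p 1).any (fun l => 2 ≤ l) := by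
  induction ds generalizing p with
  | nil => simp [hrdGoA, hrdRuns]
  | cons d ds ih =>
    simp only [hrdGoA, hrdRuns]
    by_cases h : d = p
    · simp [h, hrdRuns_any_ge_two ds p 2 (by omega)]
    · have : ¬ (some d = some p) := by simp [h]
      simp [h, this, ih d]

-- max_2 = true: A's loop with counter c equals "2 occurs among the run lengths".
theorem hrdGoA_true (ds : List Int) (p c : Int) :
    hrdGoA true ds c (some p) = (hrdRuns ds p c).contains 2 := by
  induction ds generalizing p c with
  | nil =>
    simp only [hrdGoA, hrdRuns, List.contains_cons, List.contains_nil, Bool.or_false]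
    by_cases h : c = 2 <;> simp [h] <;> omega
  | cons d ds ih =>
    by_cases h : d = p
    · subst h
      simp only [hrdGoA, hrdRuns]
      simp [ih]
    · have hne : ¬ (some d = some p) := by simp [h]
      simp only [hrdGoA, hrdRuns, if_neg hne, if_neg h]
      by_cases h2 : c = 2
      · simp [h2]
      · have hb : (c == 2) = false := by simp [h2]
        simp [hb, ih d]
        omega

-- ===== VERDICT (by name: the statement is the Claim_ definition above) =====
theorem has_repeating_digits_spec : Claim_equal_has_repeating_digits := by
  intro digits max_2 _
  unfold Spec_has_repeating_digits has_repeating_digits has_repeating_digits_alt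
  cases digits with
  | nil => cases max_2 <;> simp [hrdGoA, hrdLengths]
  | cons d ds =>
    cases max_2 with
    | false =>
      simp only [hrdGoA, hrdLengths]
      simp [hrdGoA_false ds d]
    | true =>
      simp only [hrdGoA, hrdLengths]
      simp [hrdGoA_true ds d 1]
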